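-- pv_equiv track=rewrite | github.com/faustodavid/smith | scripts/smith_format.py | format_grep_matches
-- ===== SOURCE A (Python) =====
-- def format_grep_matches(
--     file_path: str,
--     lines: list[str],
--     match_line_nums: set[int],
--     context_lines: int,
--     include_line_numbers: bool = True,
-- ) -> list[str]:
--     if not match_line_nums:
--         return []
--
--     lines_to_show: set[int] = set()
--     for line_num in match_line_nums:
--         start = max(0, line_num - context_lines)
--         end = min(len(lines) - 1, line_num + context_lines)
--         for i in range(start, end + 1):
--             lines_to_show.add(i)
--
--     sorted_lines = sorted(lines_to_show)
--     output: list[str] = [file_path]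
--     prev_line = -2
--
--     for line_num in sorted_lines:
--         if prev_line >= 0 and line_num > prev_line + 1:
--             output.append("--")
--
--         if include_line_numbers:
--             marker = ":" if line_num in match_line_nums else "-"
--             output.append(f"{line_num + 1}{marker}{lines[line_num]}")
--         else:
--             output.append(lines[line_num])
--         prev_line = line_num
--
--     return output
-- ===== SOURCE B (Python) =====
-- def format_grep_matches(
--     file_path: str,
--     lines: list[str],
--     match_line_nums: set[int],
--     context_lines: int,
--     include_line_numbers: bool = True,
-- ) -> list[str]:
--     if not match_line_nums:
--         return []
--
--     n = len(lines)
--     # Difference array: delta[i] counts interval starts minus ends before i.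
--     # A running prefix sum is > 0 exactly on the lines to show.
--     delta = [0] * (n + 1)
--     for m in match_line_nums:
--         s = max(0, m - context_lines)
--         e = min(n - 1, m + context_lines)
--         if s <= e:
--             delta[s] += 1
--             delta[e + 1] -= 1
--
--     output: list[str] = [file_path]
--     cov = 0
--     emitted = False
--     for i, line in enumerate(lines):
--         cov_prev = cov
--         cov += delta[i]
--         if cov > 0:
--             if emitted and cov_prev == 0:
--                 output.append("--")
--             if include_line_numbers:
--                 marker = ":" if i in match_line_nums else "-"
--                 output.append(f"{i + 1}{marker}{line}")
--             else:
--                 output.append(line)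
--             emitted = True
--     return output
-- ===== Notes on version B (the rewrite author's own statement) =====
-- stated objective: faster
-- what changed: Instead of inserting every context index of every match into a set and sorting it, B builds an O(M+N) difference array over line indices and emits the output in a single pass over the lines, where a running prefix sum > 0 marks lines to show and a 0-to-positive transition after the first block emits the '--' separator.
import Mathlib
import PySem

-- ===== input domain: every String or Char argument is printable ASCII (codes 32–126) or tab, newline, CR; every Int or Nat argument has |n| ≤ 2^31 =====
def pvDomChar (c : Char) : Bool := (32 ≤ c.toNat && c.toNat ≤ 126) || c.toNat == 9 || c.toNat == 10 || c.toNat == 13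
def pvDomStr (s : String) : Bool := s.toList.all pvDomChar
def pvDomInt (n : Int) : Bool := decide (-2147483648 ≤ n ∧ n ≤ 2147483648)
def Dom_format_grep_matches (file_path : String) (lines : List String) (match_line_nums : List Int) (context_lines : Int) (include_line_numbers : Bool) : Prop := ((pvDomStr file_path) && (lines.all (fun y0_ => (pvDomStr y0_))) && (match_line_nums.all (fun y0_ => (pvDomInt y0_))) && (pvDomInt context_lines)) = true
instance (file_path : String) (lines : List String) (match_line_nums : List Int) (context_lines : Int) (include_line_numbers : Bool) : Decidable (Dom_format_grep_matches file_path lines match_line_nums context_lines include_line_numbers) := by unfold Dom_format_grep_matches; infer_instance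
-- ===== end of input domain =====

-- B replaces A's per-match context-index set (O(sum of interval widths) inserts + sort) by an
-- O(M + N) difference array whose running prefix sum marks the lines to show in one pass.


-- ===== PORT A =====
def format_grep_matches (file_path : String) (lines : List String) (match_line_nums : List Int) (context_lines : Int) (include_line_numbers : Bool) : List String :=
  if match_line_nums = [] then []
  else
    let lines_to_show : PySem.Set Int :=
      match_line_nums.foldl (fun acc m =>
        (PySem.List.pyRange (max 0 (m - context_lines)) (min ((lines.length : Int) - 1) (m + context_lines) + 1) 1).foldl
          (fun s i => PySem.Set.add s i) acc) PySem.Set.empty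
    let sorted_lines := PySem.List.sorted lines_to_show (fun x => x) false
    (sorted_lines.foldl (fun (st : List String × Int) i =>
        let out1 := if st.2 ≥ 0 ∧ i > st.2 + 1 then st.1 ++ ["--"] else st.1
        let out2 :=
          if include_line_numbers then
            out1 ++ [PySem.Int.toStr (i + 1) ++ (if match_line_nums.contains i then ":" else "-") ++ PySem.List.pyGetD lines i ""]
          else
            out1 ++ [PySem.List.pyGetD lines i ""]
        (out2, i)) ([file_path], -2)).1

-- ===== PORT B =====
def format_grep_matches_alt (file_path : String) (lines : List String) (match_line_nums : List Int) (context_lines : Int) (include_line_numbers : Bool) : List String :=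
  if match_line_nums = [] then []
  else
    let n : Int := (lines.length : Int)
    let delta : List Int :=
      match_line_nums.foldl (fun d m =>
        let s := max 0 (m - context_lines)
        let e := min (n - 1) (m + context_lines)
        if s ≤ e then
          let d1 := PySem.List.pySetD d s (PySem.List.pyGetD d s 0 + 1)
          PySem.List.pySetD d1 (e + 1) (PySem.List.pyGetD d1 (e + 1) 0 - 1)
        else d) (List.replicate (lines.length + 1) (0 : Int))
    ((PySem.List.enumerate lines 0).foldl (fun (st : List String × Int × Bool) p =>
        let cov := st.2.1 + PySem.List.pyGetD delta p.1 0
        if cov > 0 then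
          let out1 := if st.2.2 && st.2.1 == 0 then st.1 ++ ["--"] else st.1
          let out2 :=
            if include_line_numbers then
              out1 ++ [PySem.Int.toStr (p.1 + 1) ++ (if match_line_nums.contains p.1 then ":" else "-") ++ p.2]
            else
              out1 ++ [p.2]
          (out2, cov, true)
        else (st.1, cov, st.2.2)) ([file_path], 0, false)).1

-- ===== PRECONDITION & SPEC =====
def Spec_format_grep_matches (file_path : String) (lines : List String) (match_line_nums : List Int) (context_lines : Int) (include_line_numbers : Bool) (out : List String) : Prop := out = format_grep_matches_alt file_path lines match_line_nums context_lines include_line_numbers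
instance (file_path : String) (lines : List String) (match_line_nums : List Int) (context_lines : Int) (include_line_numbers : Bool) (out : List String) : Decidable (Spec_format_grep_matches file_path lines match_line_nums context_lines include_line_numbers out) := by unfold Spec_format_grep_matches; infer_instance

-- ===== CLAIM (what is proved, stated in full; the proofs are below) =====
def Claim_equal_format_grep_matches : Prop := ∀ (file_path : String) (lines : List String) (match_line_nums : List Int) (context_lines : Int) (include_line_numbers : Bool), Dom_format_grep_matches file_path lines match_line_nums context_lines include_line_numbers → Spec_format_grep_matches file_path lines match_line_nums context_lines include_line_numbers (format_grep_matches file_path lines match_line_nums context_lines include_line_numbers)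


-- ===== LEMMAS AND PROOFS =====

-- `pvCovB mns L c m i` : match m's (clamped) context interval contains line index i.
def pvCovB (L : List String) (c m i : Int) : Bool :=
  decide (max 0 (m - c) ≤ i ∧ i ≤ min ((L.length : Int) - 1) (m + c))

-- number of matches whose context interval contains i
def pvCnt (mns : List Int) (L : List String) (c i : Int) : Nat :=
  mns.countP (fun m => pvCovB L c m i)

-- the difference array built by B
def pvDelta (mns : List Int) (L : List String) (c : Int) : List Int :=
  mns.foldl (fun d m =>
    let s := max 0 (m - c)
    let e := min (((L.length : Int)) - 1) (m + c)
    if s ≤ e then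
      let d1 := PySem.List.pySetD d s (PySem.List.pyGetD d s 0 + 1)
      PySem.List.pySetD d1 (e + 1) (PySem.List.pyGetD d1 (e + 1) 0 - 1)
    else d) (List.replicate (L.length + 1) (0 : Int))

-- the set of line indices A shows
def pvBuild (mns : List Int) (L : List String) (c : Int) : PySem.Set Int :=
  mns.foldl (fun acc m =>
    (PySem.List.pyRange (max 0 (m - c)) (min ((L.length : Int) - 1) (m + c) + 1) 1).foldl
      (fun s i => PySem.Set.add s i) acc) PySem.Set.empty

theorem sum_take_set (v : Int) : ∀ (l : List Int) (j t : Nat), j < l.length →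
    ((l.set j v).take t).sum = (l.take t).sum + (if j < t then v - l.getD j 0 else 0) := by
  intro l
  induction l with
  | nil => intro j t h; simp at h
  | cons x xs ih =>
    intro j t h
    cases j with
    | zero =>
      cases t with
      | zero => simp
      | succ t => simp [List.set, List.take]; ring
    | succ j =>
      cases t with
      | zero => simp
      | succ t =>
        simp only [List.set, List.take, List.sum_cons]
        rw [ih j t (by simpa using h)]
        have : (j + 1 < t + 1) = (j < t) := by simp
        simp only [List.getD_cons_succ, this]
        split <;> ring

theorem mem_buildAux (rng : Int → List Int) :
    ∀ (ms : List Int) (acc : PySem.Set Int) (x : Int),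
    x ∈ ms.foldl (fun acc m => (rng m).foldl (fun s i => PySem.Set.add s i) acc) acc ↔
      x ∈ acc ∨ ∃ m ∈ ms, x ∈ rng m := by
  intro ms
  induction ms with
  | nil => intro acc x; simp
  | cons m ms ih =>
    intro acc x
    simp only [List.foldl_cons, ih]
    have hinner : x ∈ (rng m).foldl (fun s i => PySem.Set.add s i) acc ↔ x ∈ acc ∨ x ∈ rng m := by
      have := PySem.Set.mem_foldl_add (f := fun (y : Int) => y) (l := rng m) (s := acc) (y := x)
      simpa using this
    rw [hinner]
    constructor
    · rintro ((h | h) | ⟨m', hm', hx⟩)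
      · exact Or.inl h
      · exact Or.inr ⟨m, by simp, h⟩
      · exact Or.inr ⟨m', by simp [hm'], hx⟩
    · rintro (h | ⟨m', hm', hx⟩)
      · exact Or.inl (Or.inl h)
      · rcases List.mem_cons.mp hm' with h' | h'
        · exact Or.inl (Or.inr (h' ▸ hx))
        · exact Or.inr ⟨m', h', hx⟩

theorem mem_build (mns : List Int) (L : List String) (c x : Int) :
    x ∈ pvBuild mns L c ↔ ∃ m ∈ mns, pvCovB L c m x := by
  unfold pvBuild
  rw [mem_buildAux]
  simp only [PySem.List.mem_pyRange_one, pvCovB, Int.lt_add_one_iff]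
  constructor
  · rintro (h | h)
    · simp [PySem.Set.empty] at h
    · rcases h with ⟨m, hm, h1, h2⟩
      exact ⟨m, hm, by simp [h1, h2]⟩
  · rintro ⟨m, hm, h⟩
    simp only [decide_eq_true_eq] at h
    exact Or.inr ⟨m, hm, h.1, h.2⟩

theorem nodup_buildAux (rng : Int → List Int) :
    ∀ (ms : List Int) (acc : PySem.Set Int), acc.Nodup →
    (ms.foldl (fun acc m => (rng m).foldl (fun s i => PySem.Set.add s i) acc) acc).Nodup := by
  intro ms
  induction ms with
  | nil => intro acc h; simpa using h
  | cons m ms ih =>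
    intro acc h
    simp only [List.foldl_cons]
    exact ih _ (PySem.Set.nodup_update acc (rng m) h)

theorem nodup_build (mns : List Int) (L : List String) (c : Int) : (pvBuild mns L c).Nodup := by
  unfold pvBuild
  exact nodup_buildAux _ mns PySem.Set.empty (by simp [PySem.Set.empty])

theorem sorted_build (mns : List Int) (L : List String) (c : Int) :
    PySem.List.sorted (pvBuild mns L c) (fun x => x) false =
      (PySem.List.pyRange 0 (L.length : Int) 1).filter (fun i => decide (0 < pvCnt mns L c i)) := by
  apply PySem.List.sorted_eq_of_perm_of_pairwise_lt
  · apply (List.perm_ext_iff_of_nodup ?_ (nodup_build mns L c)).mpr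
    · intro x
      rw [List.mem_filter, mem_build, PySem.List.mem_pyRange_one]
      unfold pvCnt
      rw [decide_eq_true_eq, List.countP_pos_iff]
      constructor
      · rintro ⟨_, h⟩; exact h
      · rintro ⟨m, hm, h⟩
        refine ⟨?_, ⟨m, hm, h⟩⟩
        unfold pvCovB at h
        rw [decide_eq_true_eq] at h
        omega
    · exact (PySem.List.nodup_pyRange_one 0 (L.length : Int)).filter _
  · exact (PySem.List.pairwise_lt_pyRange_one 0 (L.length : Int)).filter _

theorem length_deltaAux (L : List String) (c : Int) :
    ∀ (ms : List Int) (d : List Int),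
    (ms.foldl (fun d m =>
        let s := max 0 (m - c)
        let e := min (((L.length : Int)) - 1) (m + c)
        if s ≤ e then
          let d1 := PySem.List.pySetD d s (PySem.List.pyGetD d s 0 + 1)
          PySem.List.pySetD d1 (e + 1) (PySem.List.pyGetD d1 (e + 1) 0 - 1)
        else d) d).length = d.length := by
  intro ms
  induction ms with
  | nil => intro d; rfl
  | cons m ms ih =>
    intro d
    simp only [List.foldl_cons]
    rw [ih]
    split
    · simp [PySem.List.length_pySetD]
    · rfl

theorem length_delta (mns : List Int) (L : List String) (c : Int) :
    (pvDelta mns L c).length = L.length + 1 := by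
  unfold pvDelta
  rw [length_deltaAux]
  simp

theorem sum_take_upd1 (L : List String) (c m : Int) (d : List Int)
    (hd : d.length = L.length + 1) (t : Nat) :
    (((let s := max 0 (m - c)
       let e := min (((L.length : Int)) - 1) (m + c)
       if s ≤ e then
         let d1 := PySem.List.pySetD d s (PySem.List.pyGetD d s 0 + 1)
         PySem.List.pySetD d1 (e + 1) (PySem.List.pyGetD d1 (e + 1) 0 - 1)
       else d) : List Int).take t).sum =
      (d.take t).sum +
        (if max 0 (m - c) < (t : Int) ∧ (t : Int) ≤ min ((L.length : Int) - 1) (m + c) + 1 then 1 else 0) := by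
  set s := max 0 (m - c) with hs
  set e := min (((L.length : Int)) - 1) (m + c) with he
  by_cases hse : s ≤ e
  · have h0s : (0 : Int) ≤ s := le_max_left _ _
    have h0e : (0 : Int) ≤ e + 1 := by omega
    have hsl : s.toNat < d.length := by
      have h1 : e ≤ (L.length : Int) - 1 := min_le_left _ _
      omega
    have hel : (e + 1).toNat < d.length := by
      have h1 : e ≤ (L.length : Int) - 1 := min_le_left _ _
      omega
    have hne : (e + 1).toNat ≠ s.toNat := by omega
    simp only [if_pos hse]
    rw [PySem.List.pyGetD_of_nonneg d 0 h0s, PySem.List.pySetD_of_nonneg _ _ h0s]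
    rw [PySem.List.pyGetD_of_nonneg _ 0 h0e, PySem.List.pySetD_of_nonneg _ _ h0e]
    rw [show (d.set s.toNat (d.getD s.toNat 0 + 1)).getD (e + 1).toNat 0 = d.getD (e + 1).toNat 0 by
      simp [List.getD, List.getElem?_set_ne (Ne.symm hne)]]
    rw [sum_take_set _ _ _ t (by simpa [List.length_set] using hel)]
    rw [sum_take_set _ _ _ t hsl]
    rw [show (d.set s.toNat (d.getD s.toNat 0 + 1)).getD (e + 1).toNat 0 = d.getD (e + 1).toNat 0 by
      simp [List.getD, List.getElem?_set_ne (Ne.symm hne)]]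
    split_ifs <;> omega
  · simp only [if_neg hse]
    have hcond : ¬ (s < (t : Int) ∧ (t : Int) ≤ e + 1) := by omega
    rw [if_neg hcond, add_zero]

theorem sum_take_delta (L : List String) (c : Int) :
    ∀ (ms : List Int) (d : List Int), d.length = L.length + 1 → ∀ (t : Nat), t ≤ L.length + 1 →
    ((ms.foldl (fun d m =>
        let s := max 0 (m - c)
        let e := min (((L.length : Int)) - 1) (m + c)
        if s ≤ e then
          let d1 := PySem.List.pySetD d s (PySem.List.pyGetD d s 0 + 1)
          PySem.List.pySetD d1 (e + 1) (PySem.List.pyGetD d1 (e + 1) 0 - 1)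
        else d) d).take t).sum =
      (d.take t).sum +
        (ms.countP (fun m => decide (max 0 (m - c) < (t : Int) ∧ (t : Int) ≤ min ((L.length : Int) - 1) (m + c) + 1)) : Int) := by
  intro ms
  induction ms with
  | nil => intro d hd t ht; simp
  | cons m ms ih =>
    intro d hd t ht
    simp only [List.foldl_cons, List.countP_cons]
    rw [ih _ (by
        split
        · simp [PySem.List.length_pySetD, hd]
        · exact hd) t ht]
    rw [sum_take_upd1 L c m d hd t]
    by_cases h : max 0 (m - c) < (t : Int) ∧ (t : Int) ≤ min ((L.length : Int) - 1) (m + c) + 1 <;>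
      simp [h] <;> omega

theorem sum_take_pvDelta (mns : List Int) (L : List String) (c : Int) (t : Nat) (ht : t ≤ L.length + 1) :
    ((pvDelta mns L c).take t).sum =
      (mns.countP (fun m => decide (max 0 (m - c) < (t : Int) ∧ (t : Int) ≤ min ((L.length : Int) - 1) (m + c) + 1)) : Int) := by
  unfold pvDelta
  rw [sum_take_delta L c mns _ (by simp) t ht]
  simp [List.take_replicate, List.sum_replicate]

-- prefix sum at k+1 counts the matches covering line k
theorem sum_take_succ_eq_cnt (mns : List Int) (L : List String) (c : Int) (k : Nat) (hk : k < L.length) :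
    ((pvDelta mns L c).take (k + 1)).sum = (pvCnt mns L c (k : Int) : Int) := by
  rw [sum_take_pvDelta mns L c (k + 1) (by omega)]
  unfold pvCnt pvCovB
  congr 1
  apply List.countP_congr
  intro m _
  simp only [decide_eq_true_eq]
  constructor <;> (intro h; push_cast at h ⊢; omega)

theorem main_loop (L : List String) (mns : List Int) (c : Int) (inc : Bool) :
    ∀ (tl pre out : List String) (prev cov : Int) (emitted : Bool),
    L = pre ++ tl →
    cov = ((pvDelta mns L c).take pre.length).sum →
    ((emitted = false ∧ prev = -2 ∧ ∀ j : Int, 0 ≤ j → j < (pre.length : Int) → pvCnt mns L c j = 0) ∨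
     (emitted = true ∧ 0 ≤ prev ∧ prev < (pre.length : Int) ∧ 0 < pvCnt mns L c prev ∧
        ∀ j : Int, prev < j → j < (pre.length : Int) → pvCnt mns L c j = 0)) →
    (((PySem.List.pyRange (pre.length : Int) (L.length : Int) 1).filter
        (fun i => decide (0 < pvCnt mns L c i))).foldl
      (fun (st : List String × Int) i =>
        let out1 := if st.2 ≥ 0 ∧ i > st.2 + 1 then st.1 ++ ["--"] else st.1
        let out2 :=
          if inc then
            out1 ++ [PySem.Int.toStr (i + 1) ++ (if mns.contains i then ":" else "-") ++ PySem.List.pyGetD L i ""]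
          else
            out1 ++ [PySem.List.pyGetD L i ""]
        (out2, i)) (out, prev)).1 =
    ((PySem.List.enumerate tl (pre.length : Int)).foldl
      (fun (st : List String × Int × Bool) p =>
        let cov := st.2.1 + PySem.List.pyGetD (pvDelta mns L c) p.1 0
        if cov > 0 then
          let out1 := if st.2.2 && st.2.1 == 0 then st.1 ++ ["--"] else st.1
          let out2 :=
            if inc then
              out1 ++ [PySem.Int.toStr (p.1 + 1) ++ (if mns.contains p.1 then ":" else "-") ++ p.2]
            else
              out1 ++ [p.2]
          (out2, cov, true)
        else (st.1, cov, st.2.2)) (out, cov, emitted)).1 := by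
  intro tl
  induction tl with
  | nil =>
    intro pre out prev cov emitted hL hcov hinv
    have hlen : L.length = pre.length := by simp [hL]
    rw [PySem.List.pyRange_one_eq_nil (by exact_mod_cast hlen.le)]
    simp [PySem.List.enumerate]
  | cons x tl ih =>
    intro pre out prev cov emitted hL hcov hinv
    have hklt : pre.length < L.length := by simp [hL]
    have hdl : (pvDelta mns L c).length = L.length + 1 := length_delta mns L c
    have hkd : pre.length < (pvDelta mns L c).length := by omega
    have hsucc : ((pvDelta mns L c).take (pre.length + 1)).sum =
        cov + (pvDelta mns L c).getD pre.length 0 := by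
      rw [List.sum_take_succ _ _ hkd, hcov, List.getD_eq_getElem _ _ hkd]
    have hcovnew : cov + PySem.List.pyGetD (pvDelta mns L c) (pre.length : Int) 0 =
        (pvCnt mns L c (pre.length : Int) : Int) := by
      rw [PySem.List.pyGetD_natCast, ← hsucc, sum_take_succ_eq_cnt mns L c pre.length hklt]
    have hx_line : PySem.List.pyGetD L (pre.length : Int) "" = x := by
      rw [PySem.List.pyGetD_natCast, hL]
      simp
    have hcast : ((pre.length : Int) + 1) = (((pre ++ [x]).length : Int)) := by simp
    have hL' : L = (pre ++ [x]) ++ tl := by simpa using hL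
    have hcov' : cov + PySem.List.pyGetD (pvDelta mns L c) (pre.length : Int) 0 =
        ((pvDelta mns L c).take ((pre ++ [x]).length)).sum := by
      rw [PySem.List.pyGetD_natCast, ← hsucc]
      simp
    rw [PySem.List.pyRange_one_cons (by exact_mod_cast hklt), List.filter_cons,
        PySem.List.enumerate_cons, List.foldl_cons]
    by_cases hx : 0 < pvCnt mns L c (pre.length : Int)
    · rw [if_pos (by simpa using hx), List.foldl_cons]
      dsimp only
      rw [if_pos (show cov + PySem.List.pyGetD (pvDelta mns L c) (pre.length : Int) 0 > 0 by
        rw [hcovnew]; exact_mod_cast hx)]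
      have hguard : ((prev ≥ 0 ∧ (pre.length : Int) > prev + 1) : Prop) ↔ (emitted && cov == 0) = true := by
        rcases hinv with ⟨he, hp, _⟩ | ⟨he, h0p, hpk, hcp, hall⟩
        · subst he; subst hp
          simp
        · subst he
          have hk1 : 1 ≤ pre.length := by omega
          have hcov1 : cov = (pvCnt mns L c ((pre.length : Int) - 1) : Int) := by
            have hh := sum_take_succ_eq_cnt mns L c (pre.length - 1) (by omega)
            rw [show pre.length - 1 + 1 = pre.length from by omega,
                show ((pre.length - 1 : Nat) : Int) = (pre.length : Int) - 1 from by omega] at hh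
            rw [hcov, hh]
          by_cases hp1 : prev = (pre.length : Int) - 1
          · have hpos : 0 < pvCnt mns L c ((pre.length : Int) - 1) := hp1 ▸ hcp
            simp only [Bool.true_and, beq_iff_eq]
            rw [hcov1]
            constructor
            · intro hg; omega
            · intro hg
              have : pvCnt mns L c ((pre.length : Int) - 1) = 0 := by exact_mod_cast hg
              omega
          · have hz : pvCnt mns L c ((pre.length : Int) - 1) = 0 :=
              hall _ (by omega) (by omega)
            simp only [Bool.true_and, beq_iff_eq]
            rw [hcov1, hz]
            constructor
            · intro _; rfl
            · intro _; omega
      have hguard' : (if prev ≥ 0 ∧ (pre.length : Int) > prev + 1 then out ++ ["--"] else out) =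
          (if (emitted && cov == 0) = true then out ++ ["--"] else out) := by
        by_cases h : prev ≥ 0 ∧ (pre.length : Int) > prev + 1
        · rw [if_pos h, if_pos (hguard.mp h)]
        · rw [if_neg h, if_neg (fun hh => h (hguard.mpr hh))]
      rw [hx_line, ← hguard', hcast]
      exact ih (pre ++ [x]) _ _ _ true hL' hcov'
        (Or.inr ⟨rfl, by positivity, by simp, by simpa using hx,
          fun j h1 h2 => by simp at h2; omega⟩)
    · rw [if_neg (by simpa using hx)]
      dsimp only
      have hz : pvCnt mns L c (pre.length : Int) = 0 := by omega
      rw [if_neg (show ¬ (cov + PySem.List.pyGetD (pvDelta mns L c) (pre.length : Int) 0 > 0) by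
        rw [hcovnew, hz]; simp)]
      rw [hcast]
      refine ih (pre ++ [x]) _ _ _ emitted hL' hcov' ?_
      rcases hinv with ⟨he, hp, hall⟩ | ⟨he, h0p, hpk, hcp, hall⟩
      · refine Or.inl ⟨he, hp, fun j h1 h2 => ?_⟩
        push_cast at h2
        by_cases hj : j = (pre.length : Int)
        · rw [hj]; exact hz
        · exact hall j h1 (by omega)
      · refine Or.inr ⟨he, h0p, by simp; omega, hcp, fun j h1 h2 => ?_⟩
        push_cast at h2
        by_cases hj : j = (pre.length : Int)
        · rw [hj]; exact hz
        · exact hall j h1 (by omega)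

-- ===== VERDICT (by name: the statement is the Claim_ definition above) =====
theorem format_grep_matches_spec : Claim_equal_format_grep_matches := by
  intro file_path lines match_line_nums context_lines include_line_numbers _hdom
  unfold Spec_format_grep_matches
  by_cases h : match_line_nums = []
  · simp [format_grep_matches, format_grep_matches_alt, h]
  · have hb := sorted_build match_line_nums lines context_lines
    have hm := main_loop lines match_line_nums context_lines include_line_numbers lines [] [file_path]
      (-2) 0 false rfl (by simp) (Or.inl ⟨rfl, rfl, by intro j h1 h2; simp at h2; omega⟩)
    simp only [pvBuild] at hb
    simp only [pvDelta] at hm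
    simp only [List.length_nil, Nat.cast_zero] at hm
    simp only [format_grep_matches, format_grep_matches_alt, if_neg h]
    rw [hb]
    exact hm
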